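-- pv_equiv track=rewrite | github.com/juschei/cubesolver | src/util/parsing.py | map_Y
-- ===== SOURCE A (Python) =====
-- Y_map = {
--     "R": "B",
--     "R'": "B'",
--     "L": "F",
--     "L'": "F'",
--     "F": "R",
--     "F'": "R'",
--     "B": "L",
--     "B'": "L'",
-- }
--
-- def map_Y(move: str, y_count: int):
--     """
--     move: the move to be mapped, allowed values: "R", "R'", "L", "L'", "F", "F'", "B", "B'" (the other moves are not affected by Y)
--     y_count: the number of Y moves that have been performed before the move
--
--     maps each move that depends on the Y-orientation to the corresponding move without a Y being performed first
--     """
--     if move in Y_map: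
--         y_count %= 4
--         if y_count == 4:
--             return move
--         else:
--             # compose map access in Y_map y_count times
--             for _ in range(y_count):
--                 move = Y_map[move]
--         return move
--     return move
-- ===== SOURCE B (Python) =====
-- CYCLES = [["R", "B", "L", "F"], ["R'", "B'", "L'", "F'"]]
-- POS = {m: (c, i) for c, cyc in enumerate(CYCLES) for i, m in enumerate(cyc)}
--
-- def map_Y(move: str, y_count: int):
--     p = POS.get(move)
--     if p is None:
--         return move
--     c, i = p
--     return CYCLES[c][(i + y_count) % 4]
-- ===== Notes on version B (the rewrite author's own statement) =====
-- stated objective: simpler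
-- what changed: Instead of applying the Y_map dictionary y_count%4 times in a loop, B stores the permutation as its two 4-cycles, looks up the move's (cycle, index) once, and returns cycle[(index + y_count) % 4] by a single modular-arithmetic step.
import Mathlib
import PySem

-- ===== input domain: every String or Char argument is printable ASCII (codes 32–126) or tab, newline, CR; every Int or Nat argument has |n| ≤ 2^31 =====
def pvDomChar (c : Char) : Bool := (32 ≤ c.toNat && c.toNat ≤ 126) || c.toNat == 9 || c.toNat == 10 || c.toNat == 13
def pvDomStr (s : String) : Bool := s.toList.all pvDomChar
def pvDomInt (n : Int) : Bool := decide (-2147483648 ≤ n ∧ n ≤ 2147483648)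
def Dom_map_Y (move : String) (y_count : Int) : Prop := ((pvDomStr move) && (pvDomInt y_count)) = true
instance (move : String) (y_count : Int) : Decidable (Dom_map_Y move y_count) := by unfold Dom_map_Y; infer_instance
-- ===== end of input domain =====

-- B replaces the repeated-map loop by a single index arithmetic step in the permutation's two 4-cycles (objective: simpler).

-- ===== PORT A =====
def Y_map : PySem.Dict String String :=
  PySem.Dict.ofList [("R","B"),("R'","B'"),("L","F"),("L'","F'"),("F","R"),("F'","R'"),("B","L"),("B'","L'")]

def map_Y (move : String) (y_count : Int) : String :=
  if Y_map.contains move then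
    -- y_count %= 4 ; (the 'y_count == 4' branch of A is dead after the %=, kept literally)
    if PySem.Int.mod y_count 4 == 4 then move
    else (PySem.List.pyRange 0 (PySem.Int.mod y_count 4) 1).foldl
           (fun m _ => (Y_map.get? m).getD m) move   -- Y_map[move]; the key is always present here
  else move

-- ===== PORT B =====
def pvCycles : List (List String) := [["R","B","L","F"],["R'","B'","L'","F'"]]

def pvPos : PySem.Dict String (Int × Int) :=
  (PySem.List.enumerate pvCycles).foldl
    (fun d ci => (PySem.List.enumerate ci.2).foldl
      (fun d im => d.insert im.2 ((ci.1 : Int), (im.1 : Int))) d)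
    PySem.Dict.empty

def map_Y_alt (move : String) (y_count : Int) : String :=
  match pvPos.get? move with
  | none => move
  | some (c, i) =>
    (PySem.List.pyGet? ((PySem.List.pyGet? pvCycles c).getD [])
       (PySem.Int.mod (i + y_count) 4)).getD move   -- CYCLES[c][(i + y_count) % 4]; always in range here

-- ===== PRECONDITION & SPEC =====
def Spec_map_Y (move : String) (y_count : Int) (out : String) : Prop := out = map_Y_alt move y_count
instance (move : String) (y_count : Int) (out : String) : Decidable (Spec_map_Y move y_count out) := by unfold Spec_map_Y; infer_instance

-- ===== CLAIM (what is proved, stated in full; the proofs are below) =====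
def Claim_equal_map_Y : Prop := ∀ (move : String) (y_count : Int), Dom_map_Y move y_count → Spec_map_Y move y_count (map_Y move y_count)

-- ===== LEMMAS AND PROOFS =====

-- both ports depend on y_count only through y_count % 4
theorem map_Y_mod (move : String) (y y' : Int) (h : y % 4 = y' % 4) :
    map_Y move y = map_Y move y' := by
  unfold map_Y
  rw [PySem.Int.mod_eq_emod_of_pos (by norm_num), PySem.Int.mod_eq_emod_of_pos (by norm_num), h]

theorem map_Y_alt_mod (move : String) (y y' : Int) (h : y % 4 = y' % 4) :
    map_Y_alt move y = map_Y_alt move y' := by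
  unfold map_Y_alt
  cases hp : pvPos.get? move with
  | none => rfl
  | some p =>
    obtain ⟨c, i⟩ := p
    dsimp only
    have : PySem.Int.mod (i + y) 4 = PySem.Int.mod (i + y') 4 := by
      rw [PySem.Int.mod_eq_emod_of_pos (by norm_num), PySem.Int.mod_eq_emod_of_pos (by norm_num)]
      omega
    rw [this]

-- ===== VERDICT (by name: the statement is the Claim_ definition above) =====
theorem map_Y_spec : Claim_equal_map_Y := by
  intro move y _
  unfold Spec_map_Y
  rw [map_Y_mod move y (y % 4) (by omega), map_Y_alt_mod move y (y % 4) (by omega)]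
  have h4 : y % 4 = 0 ∨ y % 4 = 1 ∨ y % 4 = 2 ∨ y % 4 = 3 := by omega
  by_cases h1 : move = "R"
  · subst h1; rcases h4 with h|h|h|h <;> rw [h] <;> decide
  · by_cases h2 : move = "R'"
    · subst h2; rcases h4 with h|h|h|h <;> rw [h] <;> decide
    · by_cases h3 : move = "L"
      · subst h3; rcases h4 with h|h|h|h <;> rw [h] <;> decide
      · by_cases h4' : move = "L'"
        · subst h4'; rcases h4 with h|h|h|h <;> rw [h] <;> decide
        · by_cases h5 : move = "F"
          · subst h5; rcases h4 with h|h|h|h <;> rw [h] <;> decide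
          · by_cases h6 : move = "F'"
            · subst h6; rcases h4 with h|h|h|h <;> rw [h] <;> decide
            · by_cases h7 : move = "B"
              · subst h7; rcases h4 with h|h|h|h <;> rw [h] <;> decide
              · by_cases h8 : move = "B'"
                · subst h8; rcases h4 with h|h|h|h <;> rw [h] <;> decide
                · -- move is none of the eight mapped moves: both sides return it unchanged
                  have hkY : Y_map.keys = ["R","R'","L","L'","F","F'","B","B'"] := by decide
                  have hkP : pvPos.keys = ["R","B","L","F","R'","B'","L'","F'"] := by decide
                  have hc : Y_map.contains move = false := by
                    rw [PySem.Dict.contains_eq_decide_mem_keys, hkY]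
                    simp [h1, h2, h3, h4', h5, h6, h7, h8]
                  have hp : pvPos.get? move = none := by
                    rw [PySem.Dict.get?_eq_none_iff_not_mem_keys, hkP]
                    simp [h1, h2, h3, h4', h5, h6, h7, h8]
                  rcases h4 with h|h|h|h <;> rw [h] <;>
                    simp [map_Y, map_Y_alt, hc, hp]
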